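-- pv_equiv track=rewrite | github.com/TianQingChe/Algorithms-and-Data-Structures | LeetCode/Trapping Rain Water.py | left_trap
-- ===== SOURCE A (Python) =====
-- def left_trap(height):
--     low=0
--     high=0
--     temp=0
--     water=0
--     for i in range(len(height)):
--         if height[i]>0:
--             low=i
--             high=i
--             break;
--     start=high
--     for i in range(start,len(height)):
--         if height[i]>=height[high]:
--             if i!=high:
--                 high=i
--                 water+=(high-low-1)*height[low]-temp
--                 temp=0
--                 low=high
--         else:
--             temp+=height[i]
--     return water
-- ===== SOURCE B (Python) =====
-- def left_trap(height):
--     if not height: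
--         return 0
--     s = next((i for i, h in enumerate(height) if h > 0), 0)
--     arr = height[s:]
--     m = max(arr)
--     L = len(arr) - 1 - arr[::-1].index(m)
--     water = 0
--     leftmax = arr[0]
--     for h in arr[:L + 1]:
--         leftmax = max(leftmax, h)
--         water += leftmax - h
--     return water
-- ===== Notes on version B (the rewrite author's own statement) =====
-- stated objective: simpler
-- what changed: Replaces A's deferred segment accounting (index pair low/high, pending sum temp, payout (high-low-1)*height[low]-temp at each new running max) by a direct running-left-max pass that adds leftmax-h for each bar up to the last occurrence of the maximum, computed once up front via max() and a reverse index.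
import Mathlib
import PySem

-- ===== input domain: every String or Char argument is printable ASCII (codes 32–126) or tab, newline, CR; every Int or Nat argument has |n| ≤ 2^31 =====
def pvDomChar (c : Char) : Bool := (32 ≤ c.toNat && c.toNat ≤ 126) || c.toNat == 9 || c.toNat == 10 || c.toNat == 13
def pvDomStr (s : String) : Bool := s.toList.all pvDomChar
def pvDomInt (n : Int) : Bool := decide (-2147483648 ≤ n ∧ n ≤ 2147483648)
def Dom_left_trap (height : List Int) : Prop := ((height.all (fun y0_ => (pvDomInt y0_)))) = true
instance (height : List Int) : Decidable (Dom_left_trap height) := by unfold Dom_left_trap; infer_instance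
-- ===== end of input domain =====

-- B replaces A's deferred segment accounting by a direct running-left-max pass truncated at the
-- last occurrence of the maximum (objective: simpler).

-- ===== PORT A =====
-- first loop with break: index of the first element > 0 (low/high stay 0 if none)
def ltFindPos : List Int → Nat → Option Nat
  | [], _ => none
  | h :: t, i => if h > 0 then some i else ltFindPos t (i + 1)

-- one iteration of A's second loop; height[i]/height[high]/height[low] are always in range, so getD is exact
def ltStep (height : List Int) (s : Nat × Nat × Int × Int) (i : Nat) : Nat × Nat × Int × Int :=
  let (low, high, temp, water) := s
  let hi := height.getD i 0
  if hi ≥ height.getD high 0 then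
    if i ≠ high then
      (i, i, 0, water + ((i : Int) - (low : Int) - 1) * height.getD low 0 - temp)
    else s
  else (low, high, temp + hi, water)

def left_trap (height : List Int) : Int :=
  let start := (ltFindPos height 0).getD 0
  -- range(start, len(height))
  let r := (List.range' start (height.length - start)).foldl (ltStep height) (start, start, 0, 0)
  r.2.2.2

-- ===== PORT B =====
-- one iteration of B's loop: leftmax = max(leftmax, h); water += leftmax - h
def ltScan (s : Int × Int) (h : Int) : Int × Int :=
  let lm := max s.1 h
  (lm, s.2 + (lm - h))

def left_trap_alt (height : List Int) : Int :=
  if height = [] then 0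
  else
    let s := (height.findIdx? (fun h => h > 0)).getD 0   -- next((i for i,h ...), 0)
    let arr := height.drop s                              -- height[s:], exact: 0 ≤ s ≤ len
    let m := (PySem.List.max? arr (fun y => y)).getD 0    -- max(arr); arr is nonempty
    let L := arr.length - 1 - ((PySem.List.index? arr.reverse m).getD 0)
    ((arr.take (L + 1)).foldl ltScan (arr.headD 0, 0)).2  -- for h in arr[:L+1]

-- ===== PRECONDITION & SPEC =====
def Spec_left_trap (height : List Int) (out : Int) : Prop := out = left_trap_alt height
instance (height : List Int) (out : Int) : Decidable (Spec_left_trap height out) := by unfold Spec_left_trap; infer_instance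

-- ===== CLAIM (what is proved, stated in full; the proofs are below) =====
def Claim_equal_left_trap : Prop := ∀ (height : List Int), Dom_left_trap height → Spec_left_trap height (left_trap height)

-- ===== LEMMAS AND PROOFS =====

-- index-free restatement of A's second loop: m = height[low], owed = (i-low-1)*height[low] - temp
def aloop (m owed water : Int) : List Int → Int
  | [] => water
  | h :: t => if h ≥ m then aloop h 0 (water + owed) t
              else aloop m (owed + (m - h)) water t

-- number of elements of the list up to (and including) the last weak record w.r.t. seed m
def lastRecLen (m : Int) : List Int → Nat
  | [] => 0
  | h :: t => if m ≤ h then 1 + lastRecLen h t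
              else if lastRecLen m t = 0 then 0 else lastRecLen m t + 1

theorem lastRecLen_eq_zero (m : Int) (t : List Int) (h : ∀ x ∈ t, x < m) :
    lastRecLen m t = 0 := by
  induction t with
  | nil => rfl
  | cons a t ih =>
    have ha := h a (by simp)
    have ht : ∀ x ∈ t, x < m := fun x hx => h x (by simp [hx])
    simp [lastRecLen, ih ht, not_le.mpr ha]

theorem lastRecLen_decomp (M : Int) :
    ∀ (t : List Int), ∀ (x : Int) (u v : List Int),
      x :: t = u ++ M :: v → (∀ h ∈ x :: t, h ≤ M) → (∀ h ∈ v, h ≠ M) →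
      lastRecLen x t = u.length := by
  intro t
  induction t with
  | nil =>
    intro x u v he _ _
    match u, he with
    | [], he => simp [lastRecLen]
    | a :: u', he =>
      exfalso
      injection he with _ h2
      exact (List.cons_ne_nil M v) (List.append_eq_nil_iff.mp h2.symm).2
  | cons h0 t' ih =>
    intro x u v he hle hv
    match u, he with
    | [], he =>
      injection he with h1 h2
      subst h1; subst h2
      have hlt : ∀ y ∈ h0 :: t', y < x := by
        intro y hy
        exact lt_of_le_of_ne (hle y (List.mem_cons_of_mem x hy)) (hv y hy)
      simp [lastRecLen_eq_zero x (h0 :: t') hlt]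
    | u0 :: u', he =>
      injection he with h1 h2
      subst h1
      have h2' : h0 :: t' = u' ++ M :: v := h2
      by_cases hx : x ≤ h0
      · have hrec := ih h0 u' v h2'
          (fun y hy => hle y (List.mem_cons_of_mem x hy)) hv
        simp only [lastRecLen, if_pos hx, hrec, List.length_cons]
        omega
      · match u', h2' with
        | [], h2' =>
          exfalso
          injection h2' with hM _
          exact hx (hM ▸ hle x (List.mem_cons_self))
        | w :: u'', h2' =>
          injection h2' with hw ht'
          have hrec := ih x (x :: u'') v (by simp [ht'])
            (fun y hy => by
              rcases List.mem_cons.mp hy with h | h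
              · exact h ▸ hle x List.mem_cons_self
              · exact hle y (List.mem_cons_of_mem x (List.mem_cons_of_mem h0 h))) hv
          have hne : lastRecLen x t' = u''.length + 1 := by simpa using hrec
          have hz : ¬ (u''.length + 1 = 0) := by omega
          simp only [lastRecLen, if_neg hx, hne, if_neg hz, List.length_cons]

-- the accumulator of B's fold splits off
theorem foldl_ltScan_split (l : List Int) :
    ∀ (lm w : Int), List.foldl ltScan (lm, w) l
      = ((List.foldl ltScan (lm, 0) l).1, w + (List.foldl ltScan (lm, 0) l).2) := by
  induction l with
  | nil => intro lm w; simp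
  | cons h t ih =>
    intro lm w
    simp only [List.foldl_cons, ltScan]
    rw [ih (max lm h) (w + (max lm h - h)), ih (max lm h) (0 + (max lm h - h))]
    simp only [Prod.mk.injEq]
    exact ⟨trivial, by ring⟩

-- A's index-free loop equals B's truncated running-max fold
theorem aloop_eq_scan :
    ∀ (t : List Int) (m owed w : Int),
      aloop m owed w t
        = if lastRecLen m t = 0 then w
          else w + owed + (List.foldl ltScan (m, 0) (t.take (lastRecLen m t))).2 := by
  intro t
  induction t with
  | nil => intro m owed w; simp [aloop, lastRecLen]
  | cons h t' ih =>
    intro m owed w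
    simp only [aloop, lastRecLen]
    by_cases hm : m ≤ h
    · have hge : h ≥ m := hm
      rw [if_pos hge, if_pos hm, ih h 0 (w + owed)]
      by_cases hz : lastRecLen h t' = 0
      · simp [hz, ltScan, max_eq_right hm]
      · rw [if_neg hz, if_neg (by omega : ¬ 1 + lastRecLen h t' = 0)]
        rw [Nat.add_comm 1 (lastRecLen h t'), List.take_succ_cons]
        simp only [List.foldl_cons, ltScan, max_eq_right hm]
        rw [foldl_ltScan_split]
        ring_nf
    · have hge : ¬ h ≥ m := hm
      rw [if_neg hge, if_neg hm, ih m (owed + (m - h)) w]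
      by_cases hz : lastRecLen m t' = 0
      · simp [hz]
      · simp only [if_neg hz]
        rw [if_neg (by omega : ¬ lastRecLen m t' + 1 = 0), List.take_succ_cons]
        simp only [List.foldl_cons, ltScan, max_eq_left (le_of_not_ge hm)]
        simp only [foldl_ltScan_split _ m (0 + (m - h))]
        ring

-- getD of an in-range index through drop
theorem getD_of_drop_cons (height : List Int) (i : Nat) (h : Int) (t : List Int)
    (hd : height.drop i = h :: t) : height.getD i 0 = h := by
  have h2 : (height.drop i)[0]? = some h := by rw [hd]; rfl
  rw [List.getElem?_drop, Nat.add_zero] at h2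
  simp [List.getD, h2]

-- bridge: A's indexed fold from position i with state (low, low, temp, water) is aloop on the suffix
theorem foldl_bridge (height : List Int) :
    ∀ (rest : List Int) (i low : Nat) (temp water : Int),
      low < i → height.drop i = rest →
      ((List.range' i (height.length - i)).foldl (ltStep height) (low, low, temp, water)).2.2.2
        = aloop (height.getD low 0) (((i : Int) - (low : Int) - 1) * height.getD low 0 - temp)
            water rest := by
  intro rest
  induction rest with
  | nil =>
    intro i low temp water _ hd
    have : height.length ≤ i := by
      have := congrArg List.length hd
      simp at this; omega
    simp [Nat.sub_eq_zero_of_le this, aloop]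
  | cons h t ih =>
    intro i low temp water hlow hd
    have hilen : i < height.length := by
      have := congrArg List.length hd
      simp at this; omega
    have hgi : height.getD i 0 = h := getD_of_drop_cons height i h t hd
    have hrange : List.range' i (height.length - i)
        = i :: List.range' (i + 1) (height.length - (i + 1)) := by
      have h1 : height.length - i = (height.length - (i + 1)) + 1 := by omega
      rw [h1, List.range'_succ]
    rw [hrange]
    simp only [List.foldl_cons]
    by_cases hge : height.getD i 0 ≥ height.getD low 0
    · have hne : i ≠ low := by omega
      have hstep : ltStep height (low, low, temp, water) i
          = (i, i, 0, water + ((i : Int) - (low : Int) - 1) * height.getD low 0 - temp) := by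
        show (if height.getD i 0 ≥ height.getD low 0 then
                if i ≠ low then (i, i, 0, water + ((i : Int) - (low : Int) - 1) * height.getD low 0 - temp)
                else (low, low, temp, water)
              else (low, low, temp + height.getD i 0, water)) = _
        rw [if_pos hge, if_pos hne]
      rw [hstep]
      have hd' : height.drop (i + 1) = t := by
        rw [← List.tail_drop, hd]; rfl
      rw [ih (i + 1) i 0 (water + ((i : Int) - (low : Int) - 1) * height.getD low 0 - temp)
        (by omega) hd']
      rw [hgi]
      have h0 : ((i + 1 : Nat) : Int) - (i : Nat) - 1 = 0 := by push_cast; ring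
      rw [h0]
      rw [hgi] at hge
      conv_rhs => simp only [aloop]
      rw [if_pos hge]
      have e : water + ((i : Int) - (low : Int) - 1) * height.getD low 0 - temp
          = water + (((i : Int) - (low : Int) - 1) * height.getD low 0 - temp) := by ring
      rw [e, show (0 : Int) * h - 0 = 0 from by ring]
    · have hstep : ltStep height (low, low, temp, water) i
          = (low, low, temp + height.getD i 0, water) := by
        show (if height.getD i 0 ≥ height.getD low 0 then
                if i ≠ low then (i, i, 0, water + ((i : Int) - (low : Int) - 1) * height.getD low 0 - temp)
                else (low, low, temp, water)
              else (low, low, temp + height.getD i 0, water)) = _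
        rw [if_neg hge]
      rw [hstep]
      have hd' : height.drop (i + 1) = t := by
        rw [← List.tail_drop, hd]; rfl
      rw [ih (i + 1) low (temp + height.getD i 0) water (by omega) hd']
      rw [hgi] at hge ⊢
      have hlt : ¬ h ≥ height.getD low 0 := hge
      simp only [aloop, if_neg hlt]
      have e : (((i + 1 : Nat) : Int) - (low : Nat) - 1) * height.getD low 0 - (temp + h)
          = ((i : Int) - (low : Nat) - 1) * height.getD low 0 - temp + (height.getD low 0 - h) := by
        push_cast; ring
      rw [e]

-- A's break-search agrees with B's findIdx?
theorem ltFindPos_eq (l : List Int) :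
    ∀ (i : Nat), ltFindPos l i = (List.findIdx? (fun h => h > 0) l).map (· + i) := by
  induction l with
  | nil => intro i; rfl
  | cons h t ih =>
    intro i
    by_cases hp : h > 0
    · simp [ltFindPos, hp, List.findIdx?_cons]
    · simp only [ltFindPos, if_neg hp, List.findIdx?_cons]
      rw [ih (i + 1)]
      cases List.findIdx? (fun h => h > 0) t with
      | none => simp [hp]
      | some k => simp [hp]; omega

theorem left_trap_spec : Claim_equal_left_trap := by
  unfold Claim_equal_left_trap
  intro height _
  unfold Spec_left_trap
  by_cases hnil : height = []
  · subst hnil; rfl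
  ·
    -- shared start index
    have hslt : (List.findIdx? (fun h : Int => h > 0) height).getD 0 < height.length := by
      cases hfi : List.findIdx? (fun h : Int => h > 0) height with
      | none => simpa using List.length_pos_of_ne_nil hnil
      | some k =>
        have := List.findIdx?_eq_some_iff_findIdx_eq.mp hfi
        simp; omega
    obtain ⟨x, t, harr⟩ : ∃ x t,
        height.drop ((List.findIdx? (fun h : Int => h > 0) height).getD 0) = x :: t := by
      cases hd : height.drop ((List.findIdx? (fun h : Int => h > 0) height).getD 0) with
      | nil =>
        exfalso
        rw [List.drop_eq_nil_iff] at hd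
        omega
      | cons a b => exact ⟨a, b, rfl⟩
    have hstart : (ltFindPos height 0).getD 0
        = (List.findIdx? (fun h : Int => h > 0) height).getD 0 := by
      rw [ltFindPos_eq height 0]
      cases List.findIdx? (fun h : Int => h > 0) height <;> simp
    have hgx : height.getD ((List.findIdx? (fun h : Int => h > 0) height).getD 0) 0 = x :=
      getD_of_drop_cons height _ x t harr
    -- ===== A side reduces to aloop x 0 0 t =====
    have hA : left_trap height = aloop x 0 0 t := by
      simp only [left_trap, hstart]
      have hrange : List.range' ((List.findIdx? (fun h : Int => h > 0) height).getD 0)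
            (height.length - (List.findIdx? (fun h : Int => h > 0) height).getD 0)
          = ((List.findIdx? (fun h : Int => h > 0) height).getD 0)
              :: List.range' ((List.findIdx? (fun h : Int => h > 0) height).getD 0 + 1)
                (height.length - ((List.findIdx? (fun h : Int => h > 0) height).getD 0 + 1)) := by
        have h1 : height.length - (List.findIdx? (fun h : Int => h > 0) height).getD 0
            = (height.length - ((List.findIdx? (fun h : Int => h > 0) height).getD 0 + 1)) + 1 := by
          omega
        rw [h1, List.range'_succ]
      rw [hrange]
      simp only [List.foldl_cons]
      have hstep : ltStep height
            ((List.findIdx? (fun h : Int => h > 0) height).getD 0,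
             (List.findIdx? (fun h : Int => h > 0) height).getD 0, 0, 0)
            ((List.findIdx? (fun h : Int => h > 0) height).getD 0)
          = ((List.findIdx? (fun h : Int => h > 0) height).getD 0,
             (List.findIdx? (fun h : Int => h > 0) height).getD 0, 0, 0) := by
        show (if height.getD ((List.findIdx? (fun h : Int => h > 0) height).getD 0) 0
                  ≥ height.getD ((List.findIdx? (fun h : Int => h > 0) height).getD 0) 0 then
                if (List.findIdx? (fun h : Int => h > 0) height).getD 0
                    ≠ (List.findIdx? (fun h : Int => h > 0) height).getD 0 then _ else _
              else _) = _
        rw [if_pos le_rfl, if_neg (by simp)]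
      rw [hstep]
      have hd' : height.drop ((List.findIdx? (fun h : Int => h > 0) height).getD 0 + 1) = t := by
        rw [← List.tail_drop, harr]; rfl
      rw [foldl_bridge height t ((List.findIdx? (fun h : Int => h > 0) height).getD 0 + 1)
        ((List.findIdx? (fun h : Int => h > 0) height).getD 0) 0 0 (by omega) hd']
      rw [hgx]
      have e : ((((List.findIdx? (fun h : Int => h > 0) height).getD 0 + 1 : Nat) : Int)
            - ((List.findIdx? (fun h : Int => h > 0) height).getD 0 : Nat) - 1) * x - 0 = 0 := by
        push_cast; ring
      rw [e]
    -- ===== the maximum of arr and its last occurrence =====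
    have hmax : PySem.List.max? (x :: t) (fun y => y) = some (t.foldl max x) :=
      PySem.List.max?_id_cons x t
    have hmem : t.foldl max x ∈ x :: t := PySem.List.max?_mem hmax
    have hle : ∀ y ∈ x :: t, y ≤ t.foldl max x := by
      intro y hy
      exact PySem.List.max?_isMax hmax y hy
    obtain ⟨r, hr⟩ : ∃ r, PySem.List.index? (x :: t).reverse (t.foldl max x) = some r :=
      Option.isSome_iff_exists.mp
        ((PySem.List.index?_isSome_iff _ _).mpr (List.mem_reverse.mpr hmem))
    obtain ⟨pre, suf, hrev, hprelen, hpre⟩ :=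
      (PySem.List.index?_eq_some_iff _ _ _).mp hr
    have hdecomp : x :: t = suf.reverse ++ (t.foldl max x) :: pre.reverse := by
      have := congrArg List.reverse hrev
      simpa using this
    have hK : lastRecLen x t = suf.reverse.length :=
      lastRecLen_decomp (t.foldl max x) t x suf.reverse pre.reverse hdecomp hle
        (fun y hy heq => hpre (heq ▸ List.mem_reverse.mp hy))
    have hlen : t.length = suf.length + r := by
      have := congrArg List.length hdecomp
      simp [hprelen] at this
      omega
    have hL : (x :: t).length - 1 - r = lastRecLen x t := by
      rw [hK]
      simp only [List.length_reverse, List.length_cons]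
      omega
    -- ===== B side =====
    have hB : left_trap_alt height
        = (List.foldl ltScan (x, 0 + (x - x)) (t.take (lastRecLen x t))).2 := by
      simp only [left_trap_alt, if_neg hnil, harr, hmax, Option.getD_some, hr]
      rw [hL]
      have htake : (x :: t).take (lastRecLen x t + 1) = x :: t.take (lastRecLen x t) :=
        List.take_succ_cons
      rw [htake]
      simp only [List.headD, List.foldl_cons, ltScan, max_self]
    rw [hA, hB, aloop_eq_scan t x 0 0]
    by_cases hz : lastRecLen x t = 0
    · simp [hz]
    · rw [if_neg hz]
      rw [foldl_ltScan_split _ x (0 + (x - x))]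
      ring
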